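-- pv_equiv track=rewrite | github.com/Collin-Campbell/coding_solutions | coding_solutions/LongestPossible.py | csLongestPossible
-- ===== SOURCE A (Python) =====
-- def csLongestPossible(str_1, str_2):
--     ans = ''
--     for letter in str_1 + str_2:
--         if letter not in ans:
--             ans += letter
--
--     ans2 = ''
--     for letter in sorted(ans):
--         ans2 += letter
--
--     return ans2
-- ===== SOURCE B (Python) =====
-- def csLongestPossible(str_1, str_2):
--     out = []
--     prev = None
--     for c in sorted(str_1 + str_2):
--         if c != prev:
--             out.append(c)
--             prev = c
--     return ''.join(out)
-- ===== Notes on version B (the rewrite author's own statement) =====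
-- stated objective: alternative
-- what changed: A dedups order-preservingly with a membership test on the growing result string and sorts afterwards; B sorts the concatenation once and removes duplicates in a single linear pass by comparing each character to the previous one.
import Mathlib
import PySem

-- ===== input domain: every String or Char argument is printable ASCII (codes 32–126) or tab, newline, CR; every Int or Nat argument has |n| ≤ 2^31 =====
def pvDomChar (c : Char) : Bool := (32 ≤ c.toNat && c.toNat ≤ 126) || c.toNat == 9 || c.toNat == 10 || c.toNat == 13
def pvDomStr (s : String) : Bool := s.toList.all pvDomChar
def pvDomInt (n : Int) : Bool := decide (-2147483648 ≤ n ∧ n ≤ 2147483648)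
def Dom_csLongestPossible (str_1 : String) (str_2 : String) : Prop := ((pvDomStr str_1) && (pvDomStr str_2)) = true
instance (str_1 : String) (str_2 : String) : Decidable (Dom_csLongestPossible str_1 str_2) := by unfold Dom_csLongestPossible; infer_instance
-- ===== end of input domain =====

-- B sorts the concatenation once and dedups by comparing adjacent characters in one pass,
-- instead of A's order-preserving membership dedup followed by a separate sort.

-- ===== PORT A =====
def csLongestPossible (str_1 : String) (str_2 : String) : String :=
  let ans := (str_1 ++ str_2).toList.foldl
    (fun ans letter => if letter ∈ ans then ans else ans ++ [letter]) []
  let ans2 := (PySem.List.sorted ans (fun c => c) false).foldl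
    (fun a letter => a ++ [letter]) []
  String.mk ans2

-- ===== PORT B =====
def csLongestPossible_alt (str_1 : String) (str_2 : String) : String :=
  let st := (PySem.List.sorted (str_1 ++ str_2).toList (fun c => c) false).foldl
    (fun (st : List Char × Option Char) c =>
      if some c ≠ st.2 then (st.1 ++ [c], some c) else st) ([], none)
  String.mk st.1

-- ===== PRECONDITION & SPEC =====
def Spec_csLongestPossible (str_1 : String) (str_2 : String) (out : String) : Prop := out = csLongestPossible_alt str_1 str_2
instance (str_1 : String) (str_2 : String) (out : String) : Decidable (Spec_csLongestPossible str_1 str_2 out) := by unfold Spec_csLongestPossible; infer_instance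

-- ===== CLAIM (what is proved, stated in full; the proofs are below) =====
def Claim_equal_csLongestPossible : Prop := ∀ (str_1 : String) (str_2 : String), Dom_csLongestPossible str_1 str_2 → Spec_csLongestPossible str_1 str_2 (csLongestPossible str_1 str_2)

-- ===== LEMMAS AND PROOFS =====

-- foldl append returns the list itself
theorem pv_foldl_app (xs acc : List Char) :
    xs.foldl (fun a letter => a ++ [letter]) acc = acc ++ xs := by
  induction xs generalizing acc with
  | nil => simp
  | cons c t ih => simp [List.foldl, ih]

-- A's membership dedup
def pvMemDedup (xs acc : List Char) : List Char :=
  xs.foldl (fun ans letter => if letter ∈ ans then ans else ans ++ [letter]) acc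

theorem pvMemDedup_nodup (xs : List Char) : ∀ acc : List Char, acc.Nodup →
    (pvMemDedup xs acc).Nodup := by
  induction xs with
  | nil => intro acc h; simpa [pvMemDedup]
  | cons c t ih =>
    intro acc h
    simp only [pvMemDedup, List.foldl]
    split
    · exact ih acc h
    · rename_i hni
      refine ih _ ?_
      rw [List.nodup_append]
      refine ⟨h, List.nodup_singleton c, ?_⟩
      intro a ha b hb
      rcases List.mem_singleton.mp hb with rfl
      exact fun e => hni (e ▸ ha)

theorem pvMemDedup_mem (xs : List Char) : ∀ (acc : List Char) (x : Char),
    x ∈ pvMemDedup xs acc ↔ x ∈ acc ∨ x ∈ xs := by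
  induction xs with
  | nil => intro acc x; simp [pvMemDedup]
  | cons c t ih =>
    intro acc x
    simp only [pvMemDedup, List.foldl]
    split
    · rename_i hc
      show x ∈ pvMemDedup t acc ↔ _
      rw [ih, List.mem_cons]
      constructor
      · rintro (hh | hh)
        · exact Or.inl hh
        · exact Or.inr (Or.inr hh)
      · rintro (hh | hh | hh)
        · exact Or.inl hh
        · exact Or.inl (by rw [hh]; exact hc)
        · exact Or.inr hh
    · show x ∈ pvMemDedup t (acc ++ [c]) ↔ _
      rw [ih]
      simp only [List.mem_append, List.mem_cons]
      tauto

-- structural version of B's adjacent-duplicate dedup (proof helper; the port keeps its foldl)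
def pvAdj : Option Char → List Char → List Char
  | _, [] => []
  | p, c :: t => if some c ≠ p then c :: pvAdj (some c) t else pvAdj p t

theorem pvAdj_foldl (s : List Char) : ∀ (acc : List Char) (p : Option Char),
    (s.foldl (fun (st : List Char × Option Char) c =>
      if some c ≠ st.2 then (st.1 ++ [c], some c) else st) (acc, p)).1
    = acc ++ pvAdj p s := by
  induction s with
  | nil => intro acc p; simp [pvAdj]
  | cons c t ih =>
    intro acc p
    simp only [List.foldl, pvAdj]
    by_cases h : some c ≠ p
    · rw [if_pos h, if_pos h, ih]; simp
    · rw [if_neg h, if_neg h, ih]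

theorem pvAdj_mem_some (s : List Char) : ∀ q : Char, s.Pairwise (· ≤ ·) →
    (∀ c ∈ s, q ≤ c) → ∀ x : Char, (x ∈ pvAdj (some q) s ↔ x ∈ s ∧ x ≠ q) := by
  induction s with
  | nil => intro q _ _ x; simp [pvAdj]
  | cons c t ih =>
    intro q h hq x
    have hc : q ≤ c := hq c (by simp)
    have ht : t.Pairwise (· ≤ ·) := h.of_cons
    have hct : ∀ y ∈ t, c ≤ y := fun y hy => List.rel_of_pairwise_cons h hy
    simp only [pvAdj]
    by_cases hne : some c ≠ some q
    · rw [if_pos hne]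
      have hqc : q < c := lt_of_le_of_ne hc (by intro e; exact hne (by simp [e]))
      simp only [List.mem_cons, ih c ht hct x]
      constructor
      · rintro (rfl | ⟨hx, _⟩)
        · exact ⟨Or.inl rfl, ne_of_gt hqc⟩
        · exact ⟨Or.inr hx, ne_of_gt (lt_of_lt_of_le hqc (hct x hx))⟩
      · rintro ⟨(rfl | hx), hxq⟩
        · exact Or.inl rfl
        · by_cases hxc : x = c
          · exact Or.inl hxc
          · exact Or.inr ⟨hx, hxc⟩
    · rw [if_neg hne]
      have hcq : c = q := by simpa using not_not.mp hne
      subst hcq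
      rw [ih c ht hct x, List.mem_cons]
      constructor
      · rintro ⟨hx, hxc⟩; exact ⟨Or.inr hx, hxc⟩
      · rintro ⟨hx | hx, hxc⟩
        · exact absurd hx hxc
        · exact ⟨hx, hxc⟩

theorem pvAdj_pairwise_some (s : List Char) : ∀ q : Char, s.Pairwise (· ≤ ·) →
    (∀ c ∈ s, q ≤ c) → (pvAdj (some q) s).Pairwise (· < ·) := by
  induction s with
  | nil => intro q _ _; simp [pvAdj]
  | cons c t ih =>
    intro q h hq
    have ht : t.Pairwise (· ≤ ·) := h.of_cons
    have hct : ∀ y ∈ t, c ≤ y := fun y hy => List.rel_of_pairwise_cons h hy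
    simp only [pvAdj]
    by_cases hne : some c ≠ some q
    · rw [if_pos hne]
      refine List.pairwise_cons.mpr ⟨?_, ih c ht hct⟩
      intro x hx
      rcases (pvAdj_mem_some t c ht hct x).mp hx with ⟨hxt, hxc⟩
      exact lt_of_le_of_ne (hct x hxt) (Ne.symm hxc)
    · rw [if_neg hne]
      have hcq : c = q := by simpa using not_not.mp hne
      exact ih q ht (fun y hy => hcq ▸ hct y hy)

theorem pvAdj_none_mem (s : List Char) (h : s.Pairwise (· ≤ ·)) (x : Char) :
    x ∈ pvAdj none s ↔ x ∈ s := by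
  cases s with
  | nil => simp [pvAdj]
  | cons c t =>
    have ht : t.Pairwise (· ≤ ·) := h.of_cons
    have hct : ∀ y ∈ t, c ≤ y := fun y hy => List.rel_of_pairwise_cons h hy
    simp only [pvAdj, if_pos (by simp : some c ≠ none), List.mem_cons,
      pvAdj_mem_some t c ht hct x]
    by_cases hxc : x = c <;> simp [hxc]

theorem pvAdj_none_pairwise (s : List Char) (h : s.Pairwise (· ≤ ·)) :
    (pvAdj none s).Pairwise (· < ·) := by
  cases s with
  | nil => simp [pvAdj]
  | cons c t =>
    have ht : t.Pairwise (· ≤ ·) := h.of_cons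
    have hct : ∀ y ∈ t, c ≤ y := fun y hy => List.rel_of_pairwise_cons h hy
    simp only [pvAdj, if_pos (by simp : some c ≠ none)]
    refine List.pairwise_cons.mpr ⟨?_, pvAdj_pairwise_some t c ht hct⟩
    intro x hx
    rcases (pvAdj_mem_some t c ht hct x).mp hx with ⟨hxt, hxc⟩
    exact lt_of_le_of_ne (hct x hxt) (Ne.symm hxc)

-- core equality of the two result lists
theorem pv_lists_eq (l : List Char) :
    PySem.List.sorted (pvMemDedup l []) (fun c => c) false
      = pvAdj none (PySem.List.sorted l (fun c => c) false) := by
  set s := PySem.List.sorted l (fun c => c) false with hs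
  have hsp : s.Pairwise (· ≤ ·) := PySem.List.sorted_pairwise l (fun c => c)
  have hr_pw : (pvAdj none s).Pairwise (· < ·) := pvAdj_none_pairwise s hsp
  have hd_nd : (pvMemDedup l []).Nodup := pvMemDedup_nodup l [] (by simp)
  have hr_nd : (pvAdj none s).Nodup := hr_pw.imp ne_of_lt
  have hmem : ∀ x, x ∈ pvAdj none s ↔ x ∈ pvMemDedup l [] := by
    intro x
    rw [pvAdj_none_mem s hsp, hs, PySem.List.mem_sorted, pvMemDedup_mem]
    simp
  have hperm : (pvAdj none s).Perm (pvMemDedup l []) :=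
    (List.perm_ext_iff_of_nodup hr_nd hd_nd).mpr hmem
  exact PySem.List.sorted_eq_of_perm_of_pairwise_lt _ _ _ hperm hr_pw

-- ===== VERDICT (by name: the statement is the Claim_ definition above) =====
theorem csLongestPossible_spec : Claim_equal_csLongestPossible := by
  intro str_1 str_2 _
  show csLongestPossible str_1 str_2 = csLongestPossible_alt str_1 str_2
  simp only [csLongestPossible, csLongestPossible_alt]
  rw [pv_foldl_app, pvAdj_foldl, List.nil_append, List.nil_append]
  exact congrArg String.mk (pv_lists_eq (str_1 ++ str_2).toList)
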